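-- pv_equiv track=rewrite | github.com/Jenniemilia/Algoritmi_harjoituksia | onediff.py | find
-- ===== SOURCE A (Python) =====
-- def find(t):
--     n = len(t)
--     # pohjustus
--     pisin = [1] *n
--     tulos = 1
--     for i in range(0, n):
--         for j in range (0, i):
--             if ((t[j]-1) == t[i]) or ((t[j]+1) == t[i]):
--
--                 pisin[i] = max(pisin[i], pisin[j] +1)
--
--                 if tulos < pisin[i]:
--                     tulos = pisin[i]
--     return (tulos)
-- ===== SOURCE B (Python) =====
-- def find(t):
--     best = {}
--     tulos = 1
--     for x in t:
--         cur = 1 + max(best.get(x - 1, 0), best.get(x + 1, 0))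
--         best[x] = max(best.get(x, 0), cur)
--         if tulos < cur:
--             tulos = cur
--     return tulos
-- ===== Notes on version B (the rewrite author's own statement) =====
-- stated objective: faster
-- what changed: Replaced the O(n^2) all-previous-pairs scan by a one-pass DP with a dict from value to best chain length, looking up only the two neighbor values x-1 and x+1.
import Mathlib
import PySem

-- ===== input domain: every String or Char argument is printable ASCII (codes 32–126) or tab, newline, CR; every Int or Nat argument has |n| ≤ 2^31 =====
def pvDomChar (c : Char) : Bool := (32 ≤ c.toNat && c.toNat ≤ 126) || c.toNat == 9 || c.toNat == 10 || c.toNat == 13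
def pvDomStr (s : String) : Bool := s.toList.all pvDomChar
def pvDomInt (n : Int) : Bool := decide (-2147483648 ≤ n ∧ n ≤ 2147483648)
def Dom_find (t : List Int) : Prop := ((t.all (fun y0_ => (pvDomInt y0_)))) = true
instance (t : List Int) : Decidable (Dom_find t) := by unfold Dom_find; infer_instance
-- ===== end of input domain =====

-- B replaces A's quadratic all-previous-pairs scan by a one-pass DP keyed by value (dict lookups of x-1 / x+1).

-- ===== PORT A =====
-- inner loop body: 'if t[j]-1 == t[i] or t[j]+1 == t[i]: pisin[i] = max(pisin[i], pisin[j]+1); if tulos < pisin[i]: tulos = pisin[i]'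
-- (the re-read of pisin[i] just after the assignment is ported as the assigned value v; i is always in range, so pyGetD/pySetD are exact)
def innerBody (t : List Int) (i : Int) (st : List Int × Int) (j : Int) : List Int × Int :=
  if PySem.List.pyGetD t j 0 - 1 = PySem.List.pyGetD t i 0 ∨
     PySem.List.pyGetD t j 0 + 1 = PySem.List.pyGetD t i 0 then
    let v := max (PySem.List.pyGetD st.1 i 0) (PySem.List.pyGetD st.1 j 0 + 1)
    (PySem.List.pySetD st.1 i v, if st.2 < v then v else st.2)
  else st

-- outer loop body: 'for j in range(0, i): …' over the state (pisin, tulos)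
def outerBody (t : List Int) (st : List Int × Int) (i : Int) : List Int × Int :=
  (PySem.List.pyRange 0 i 1).foldl (innerBody t i) st

def find (t : List Int) : Int :=
  ((PySem.List.pyRange 0 (t.length : Int) 1).foldl (outerBody t)
    (List.replicate t.length 1, 1)).2

-- ===== PORT B =====
-- loop body of Source B: cur = 1 + max(best.get(x-1,0), best.get(x+1,0)); best[x] = max(best.get(x,0), cur); if tulos < cur: tulos = cur
def bStep (st : PySem.Dict Int Int × Int) (x : Int) : PySem.Dict Int Int × Int :=
  let cur := 1 + max (st.1.getD (x - 1) 0) (st.1.getD (x + 1) 0)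
  (st.1.insert x (max (st.1.getD x 0) cur), if st.2 < cur then cur else st.2)

def find_alt (t : List Int) : Int :=
  (t.foldl bStep (PySem.Dict.empty, 1)).2

-- ===== PRECONDITION & SPEC =====
def Spec_find (t : List Int) (out : Int) : Prop := out = find_alt t
instance (t : List Int) (out : Int) : Decidable (Spec_find t out) := by unfold Spec_find; infer_instance

-- ===== CLAIM (what is proved, stated in full; the proofs are below) =====
def Claim_equal_find : Prop := ∀ (t : List Int), Dom_find t → Spec_find t (find t)

-- ===== LEMMAS AND PROOFS =====

-- reference DP on the processed prefix, carried as the list of (value, chain length) pairs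
def nbF (acc : List (Int × Int)) (x : Int) : Int :=
  acc.foldl (fun a q => if q.1 - 1 = x ∨ q.1 + 1 = x then max a (q.2 + 1) else a) 1

def mAt (acc : List (Int × Int)) (v : Int) : Int :=
  acc.foldl (fun a q => if q.1 = v then max a q.2 else a) 0

def refFold (xs : List Int) (st : List (Int × Int) × Int) : List (Int × Int) × Int :=
  xs.foldl (fun st x => (st.1 ++ [(x, nbF st.1 x)], max st.2 (nbF st.1 x))) st

-- the running accumulator c, as A's inner loop computes it (reading t and the fixed prefix ps)
def cFold (t ps : List Int) (a : Int) (j : Int) : Int :=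
  if PySem.List.pyGetD t j 0 - 1 = PySem.List.pyGetD t (ps.length : Int) 0 ∨
     PySem.List.pyGetD t j 0 + 1 = PySem.List.pyGetD t (ps.length : Int) 0 then
    max a (PySem.List.pyGetD ps j 0 + 1) else a

theorem ite_lt_max (a b : Int) : (if a < b then b else a) = max a b := by
  split_ifs with h <;> omega

theorem foldl_ge {α : Type} (g : Int → α → Int) (hg : ∀ a j, a ≤ g a j) :
    ∀ (zs : List α) (a : Int), a ≤ zs.foldl g a := by
  intro zs
  induction zs with
  | nil => intro a; simp
  | cons z zs ih => intro a; exact le_trans (hg a z) (ih (g a z))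

theorem cFold_ge (t ps : List Int) : ∀ (zs : List Int) (a : Int), a ≤ zs.foldl (cFold t ps) a := by
  refine foldl_ge _ (fun a j => ?_)
  unfold cFold; split_ifs <;> omega

theorem pyGetD_append_left (l u : List Int) (j : Int) (h0 : 0 ≤ j) (h : j < (l.length : Int)) :
    PySem.List.pyGetD (l ++ u) j 0 = PySem.List.pyGetD l j 0 := by
  rw [PySem.List.pyGetD_eq_getElem _ _ h0 (by simpa using lt_of_lt_of_le h (by simp)),
      PySem.List.pyGetD_eq_getElem _ _ h0 (by simpa using h)]
  exact List.getElem_append_left (by omega)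

theorem pyGetD_append_cons_length (l : List Int) (x : Int) (u : List Int) :
    PySem.List.pyGetD (l ++ x :: u) (l.length : Int) 0 = x := by
  rw [PySem.List.pyGetD_eq_getElem _ _ (by positivity) (by simp)]
  simp

theorem pySetD_append_cons_length (l : List Int) (c v : Int) (u : List Int) :
    PySem.List.pySetD (l ++ c :: u) (l.length : Int) v = l ++ v :: u := by
  simp

-- a fold over range(0, len(acc)) reading the two component lists IS a fold over acc
theorem foldl_range_pairs (g : Int → Int × Int → Int) :
    ∀ (acc : List (Int × Int)) (u : List Int) (a : Int),
    (PySem.List.pyRange 0 (acc.length : Int) 1).foldl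
      (fun a j => g a (PySem.List.pyGetD (acc.map Prod.fst ++ u) j 0,
                       PySem.List.pyGetD (acc.map Prod.snd) j 0)) a
    = acc.foldl g a := by
  intro acc
  induction acc using List.reverseRecOn with
  | nil => intro u a; simp [PySem.List.pyRange_one_eq_nil]
  | append_singleton acc q ih =>
    intro u a
    have hlen : (((acc ++ [q]).length : Nat) : Int) = (acc.length : Int) + 1 := by simp
    rw [hlen, PySem.List.pyRange_one_succ_right (by positivity), List.foldl_append]
    have e1 : (acc ++ [q]).map Prod.fst ++ u = acc.map Prod.fst ++ (q.1 :: u) := by simp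
    have e2 : (acc ++ [q]).map Prod.snd = acc.map Prod.snd ++ (q.2 :: []) := by simp
    rw [e1, e2]
    have hcongr := PySem.List.foldl_congr_mem (PySem.List.pyRange 0 (acc.length : Int) 1)
        (fun a j => g a (PySem.List.pyGetD (acc.map Prod.fst ++ (q.1 :: u)) j 0,
                         PySem.List.pyGetD (acc.map Prod.snd ++ (q.2 :: [])) j 0))
        (fun a j => g a (PySem.List.pyGetD (acc.map Prod.fst ++ (q.1 :: u)) j 0,
                         PySem.List.pyGetD (acc.map Prod.snd) j 0)) a ?_
    · rw [hcongr, ih]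
      simp only [List.foldl_cons, List.foldl_nil, List.foldl_append]
      have h1 : PySem.List.pyGetD (acc.map Prod.fst ++ (q.1 :: u)) ((acc.length : Nat) : Int) 0 = q.1 := by
        have := pyGetD_append_cons_length (acc.map Prod.fst) q.1 u
        simpa using this
      have h2 : PySem.List.pyGetD (acc.map Prod.snd ++ (q.2 :: [])) ((acc.length : Nat) : Int) 0 = q.2 := by
        have := pyGetD_append_cons_length (acc.map Prod.snd) q.2 []
        simpa using this
      rw [h1, h2]
    · intro a j hj
      rw [PySem.List.mem_pyRange_one] at hj
      have h2 : PySem.List.pyGetD (acc.map Prod.snd ++ (q.2 :: [])) j 0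
          = PySem.List.pyGetD (acc.map Prod.snd) j 0 :=
        pyGetD_append_left _ _ j hj.1 (by simpa using hj.2)
      simp only [h2]

-- the neighbour fold splits into the two per-value maxima
theorem nbF_split : ∀ (l : List (Int × Int)) (x a1 a2 : Int),
    l.foldl (fun a q => if q.1 - 1 = x ∨ q.1 + 1 = x then max a (q.2 + 1) else a) (1 + max a1 a2)
    = 1 + max (l.foldl (fun a q => if q.1 = x - 1 then max a q.2 else a) a1)
              (l.foldl (fun a q => if q.1 = x + 1 then max a q.2 else a) a2) := by
  intro l
  induction l with
  | nil => intro x a1 a2; simp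
  | cons q l ih =>
    intro x a1 a2
    simp only [List.foldl_cons]
    by_cases h1 : q.1 = x - 1
    · rw [if_pos (by omega), if_pos h1, if_neg (by omega)]
      have hm : max (1 + max a1 a2) (q.2 + 1) = 1 + max (max a1 q.2) a2 := by omega
      rw [hm, ih]
    · by_cases h2 : q.1 = x + 1
      · rw [if_pos (by omega), if_neg h1, if_pos h2]
        have hm : max (1 + max a1 a2) (q.2 + 1) = 1 + max a1 (max a2 q.2) := by omega
        rw [hm, ih]
      · rw [if_neg (by omega), if_neg h1, if_neg h2]
        exact ih x a1 a2

theorem nbF_eq (acc : List (Int × Int)) (x : Int) :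
    nbF acc x = 1 + max (mAt acc (x - 1)) (mAt acc (x + 1)) := by
  have h := nbF_split acc x 0 0
  simp only [max_self, add_zero] at h
  rw [nbF, h, mAt, mAt]

theorem inner_fold (t ps rest : List Int) :
    ∀ (zs : List Int) (c tul : Int),
    (∀ j ∈ zs, 0 ≤ j ∧ j < (ps.length : Int)) → 1 ≤ c → c ≤ tul →
    zs.foldl (innerBody t (ps.length : Int)) (ps ++ c :: rest, tul)
    = (ps ++ (zs.foldl (cFold t ps) c) :: rest, max tul (zs.foldl (cFold t ps) c)) := by
  intro zs
  induction zs with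
  | nil =>
    intro c tul _ h1 h2
    simp only [List.foldl_nil]
    rw [max_eq_left h2]
  | cons j zs ih =>
    intro c tul hmem h1 h2
    obtain ⟨hj0, hjlt⟩ := hmem j (List.mem_cons_self ..)
    simp only [List.foldl_cons]
    by_cases hc : PySem.List.pyGetD t j 0 - 1 = PySem.List.pyGetD t ((ps.length : Nat) : Int) 0 ∨
                  PySem.List.pyGetD t j 0 + 1 = PySem.List.pyGetD t ((ps.length : Nat) : Int) 0
    · have hb : innerBody t (ps.length : Int) (ps ++ c :: rest, tul) j
          = (ps ++ (max c (PySem.List.pyGetD ps j 0 + 1)) :: rest,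
             max tul (max c (PySem.List.pyGetD ps j 0 + 1))) := by
        unfold innerBody
        rw [if_pos hc]
        simp only [pyGetD_append_cons_length, pyGetD_append_left ps (c :: rest) j hj0 hjlt,
          pySetD_append_cons_length, ite_lt_max]
      have hcf : cFold t ps c j = max c (PySem.List.pyGetD ps j 0 + 1) := by
        unfold cFold; rw [if_pos hc]
      rw [hb, hcf,
        ih _ _ (fun j' hj' => hmem j' (by simp [hj'])) (by omega) (le_max_right _ _)]
      have hF := cFold_ge t ps zs (max c (PySem.List.pyGetD ps j 0 + 1))
      have hm : max (max tul (max c (PySem.List.pyGetD ps j 0 + 1)))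
            (zs.foldl (cFold t ps) (max c (PySem.List.pyGetD ps j 0 + 1)))
          = max tul (zs.foldl (cFold t ps) (max c (PySem.List.pyGetD ps j 0 + 1))) := by
        omega
      rw [hm]
    · have hb : innerBody t (ps.length : Int) (ps ++ c :: rest, tul) j = (ps ++ c :: rest, tul) := by
        unfold innerBody; rw [if_neg hc]
      have hcf : cFold t ps c j = c := by unfold cFold; rw [if_neg hc]
      rw [hb, hcf, ih _ _ (fun j' hj' => hmem j' (by simp [hj'])) h1 h2]

theorem A_outer (t : List Int) :
    ∀ (xs : List Int) (acc : List (Int × Int)) (tul : Int),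
    t = acc.map Prod.fst ++ xs → 1 ≤ tul →
    (PySem.List.pyRange (acc.length : Int) (t.length : Int) 1).foldl (outerBody t)
      (acc.map Prod.snd ++ List.replicate xs.length 1, tul)
    = ((refFold xs (acc, tul)).1.map Prod.snd, (refFold xs (acc, tul)).2) := by
  intro xs
  induction xs with
  | nil =>
    intro acc tul ht htul
    have hlen : t.length = acc.length := by simp [ht]
    rw [hlen, PySem.List.pyRange_one_eq_nil le_rfl]
    simp [refFold]
  | cons x xs ih =>
    intro acc tul ht htul
    have hlen : (t.length : Int) = (acc.length : Int) + 1 + xs.length := by simp [ht]; omega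
    rw [PySem.List.pyRange_one_cons (by omega), List.foldl_cons]
    set ps := acc.map Prod.snd with hps
    have hpl : ((ps.length : Nat) : Int) = ((acc.length : Nat) : Int) := by simp [hps]
    have hstep : outerBody t (acc.map Prod.snd ++ List.replicate (x :: xs).length 1, tul) (acc.length : Int)
        = (ps ++ (nbF acc x) :: List.replicate xs.length 1, max tul (nbF acc x)) := by
      unfold outerBody
      rw [← hps, ← hpl, List.length_cons, List.replicate_succ]
      rw [inner_fold t ps (List.replicate xs.length 1) _ 1 tul
        (by intro j hj; rw [PySem.List.mem_pyRange_one] at hj; exact hj) le_rfl htul]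
      have hx : PySem.List.pyGetD t ((ps.length : Nat) : Int) 0 = x := by
        rw [hpl, ht]
        have := pyGetD_append_cons_length (acc.map Prod.fst) x xs
        simpa using this
      have hfun : cFold t ps = fun a j =>
          (fun (a : Int) (q : Int × Int) => if q.1 - 1 = x ∨ q.1 + 1 = x then max a (q.2 + 1) else a) a
            (PySem.List.pyGetD (acc.map Prod.fst ++ (x :: xs)) j 0,
             PySem.List.pyGetD (acc.map Prod.snd) j 0) := by
        funext a j
        unfold cFold
        rw [hx, ← ht]
      rw [hps] at hpl
      rw [hpl, hfun]
      have hrp := foldl_range_pairs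
        (fun (a : Int) (q : Int × Int) => if q.1 - 1 = x ∨ q.1 + 1 = x then max a (q.2 + 1) else a)
        acc (x :: xs) 1
      simp only [hrp]
      rfl
    rw [hstep]
    have hrf : (refFold (x :: xs) (acc, tul)) = refFold xs (acc ++ [(x, nbF acc x)], max tul (nbF acc x)) := rfl
    have ih' := ih (acc ++ [(x, nbF acc x)]) (max tul (nbF acc x))
      (by simp [ht]) (by omega)
    rw [hrf, ← ih']
    have e1 : (((acc ++ [(x, nbF acc x)]).length : Nat) : Int) = (acc.length : Int) + 1 := by simp
    rw [e1]
    congr 1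
    simp [hps]

theorem B_fold :
    ∀ (xs : List Int) (acc : List (Int × Int)) (d : PySem.Dict Int Int) (tul : Int),
    (∀ v, d.getD v 0 = mAt acc v) →
    (xs.foldl bStep (d, tul)).2 = (refFold xs (acc, tul)).2 := by
  intro xs
  induction xs with
  | nil => intro acc d tul _; rfl
  | cons x xs ih =>
    intro acc d tul hd
    simp only [List.foldl_cons]
    have hcur : 1 + max (d.getD (x - 1) 0) (d.getD (x + 1) 0) = nbF acc x := by
      rw [hd, hd, nbF_eq]
    have hb : bStep (d, tul) x
        = (d.insert x (max (d.getD x 0) (nbF acc x)), max tul (nbF acc x)) := by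
      unfold bStep
      simp only [hcur, ite_lt_max]
    rw [hb]
    have hrf : refFold (x :: xs) (acc, tul)
        = refFold xs (acc ++ [(x, nbF acc x)], max tul (nbF acc x)) := rfl
    rw [hrf]
    apply ih
    intro v
    rw [PySem.Dict.getD_insert]
    have hmAt : mAt (acc ++ [(x, nbF acc x)]) v
        = if x = v then max (mAt acc v) (nbF acc x) else mAt acc v := by
      simp [mAt, List.foldl_append]
    rw [hmAt]
    by_cases hv : v = x
    · subst hv; rw [if_pos rfl, if_pos rfl, hd]
    · rw [if_neg hv, if_neg (fun h => hv h.symm), hd]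

-- ===== VERDICT (by name: the statement is the Claim_ definition above) =====
theorem find_spec : Claim_equal_find := by
  intro t _
  unfold Spec_find find find_alt
  have hA := A_outer t t [] 1 (by simp) (by omega)
  simp only [List.map_nil, List.length_nil, Nat.cast_zero, List.nil_append] at hA
  rw [hA]
  have hB := B_fold t [] PySem.Dict.empty 1 (by intro v; simp [mAt, PySem.Dict.getD_empty])
  rw [hB]
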